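-- pv_equiv track=rewrite | github.com/toxic-byte/learn | wave.py | is_wave_number
-- ===== SOURCE A (Python) =====
-- def is_wave_number(s):
--     if len(s) == 1:
--         return True
--     unique_chars = set(s)
--     if len(unique_chars) != 2:
--         return False
--     a, b = s[0], s[1]
--     if a == b:
--         return False
--     for i in range(len(s) - 1):
--         if s[i] == s[i + 1]:
--             return False
--     return True
-- ===== SOURCE B (Python) =====
-- def is_wave_number(s):
--     if len(s) == 1:
--         return True
--     if len(s) < 2:
--         return False
--     exp, nxt = s[0], s[1]
--     if exp == nxt:
--         return False
--     for c in s: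
--         if c != exp:
--             return False
--         exp, nxt = nxt, exp
--     return True
-- ===== Notes on version B (the rewrite author's own statement) =====
-- stated objective: alternative
-- what changed: Replaced A's set-of-unique-chars cardinality check plus indexed adjacent-pair scan with a single walk that carries the expected character (swapping it each step) and compares every character against it.
import Mathlib
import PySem

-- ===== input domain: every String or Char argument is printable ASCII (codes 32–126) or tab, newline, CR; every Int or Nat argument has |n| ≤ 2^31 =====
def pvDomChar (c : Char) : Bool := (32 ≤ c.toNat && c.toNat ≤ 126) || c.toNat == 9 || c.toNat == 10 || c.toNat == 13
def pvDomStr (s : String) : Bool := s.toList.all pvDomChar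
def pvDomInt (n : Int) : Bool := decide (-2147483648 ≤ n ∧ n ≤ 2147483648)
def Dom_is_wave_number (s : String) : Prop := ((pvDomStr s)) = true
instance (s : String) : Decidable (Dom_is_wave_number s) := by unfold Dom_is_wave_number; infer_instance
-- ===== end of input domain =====

-- B replaces A's unique-char-set cardinality check + indexed adjacent-pair scan by one walk
-- carrying the expected character (swapped each step); same O(n) cost, different decomposition.

-- ===== PORT A =====
def is_wave_number (s : String) : Bool :=
  let l := s.toList
  if l.length == 1 then true
  else
    let unique_chars := PySem.Set.ofList l
    if unique_chars.length != 2 then false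
    else
      -- len(unique_chars) == 2 forces len(s) ≥ 2, so s[0]/s[1] never raise in Python;
      -- the `| _, _ => false` arm is unreachable (totality only).
      match PySem.List.pyGet? l 0, PySem.List.pyGet? l 1 with
      | some a, some b =>
        if a == b then false
        else (PySem.List.pyRange 0 ((l.length : Int) - 1) 1).all
               (fun i => !(PySem.List.pyGet? l i == PySem.List.pyGet? l (i + 1)))
      | _, _ => false

-- ===== PORT B =====
-- the for-loop of Source B with its early return, as structural recursion over the characters
def waveWalk (exp nxt : Char) : List Char → Bool
  | [] => true
  | c :: t => if c != exp then false else waveWalk nxt exp t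

def is_wave_number_alt (s : String) : Bool :=
  let l := s.toList
  if l.length == 1 then true
  else if l.length < 2 then false
  else
    match PySem.List.pyGet? l 0, PySem.List.pyGet? l 1 with
    | some a, some b => if a == b then false else waveWalk a b l
    | none, _ => false  -- unreachable: l.length ≥ 2 here
    | some _, none => false  -- unreachable likewise

-- ===== PRECONDITION & SPEC =====
def Spec_is_wave_number (s : String) (out : Bool) : Prop := out = is_wave_number_alt s
instance (s : String) (out : Bool) : Decidable (Spec_is_wave_number s out) := by unfold Spec_is_wave_number; infer_instance

-- ===== CLAIM (what is proved, stated in full; the proofs are below) =====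
def Claim_equal_is_wave_number : Prop := ∀ (s : String), Dom_is_wave_number s → Spec_is_wave_number s (is_wave_number s)

-- ===== LEMMAS AND PROOFS =====

-- no adjacent equal characters, recursively (proof-side characterisation of A's loop)
def nadj : List Char → Bool
  | a :: b :: t => (!(a == b)) && nadj (b :: t)
  | _ => true

theorem rangeAllNat_eq_nadj : ∀ l : List Char,
    (List.range (l.length - 1)).all (fun k => !(l[k]? == l[k + 1]?)) = nadj l := by
  intro l
  induction l with
  | nil => rfl
  | cons x l ih =>
    cases l with
    | nil => rfl
    | cons y t =>
      rw [show (x :: y :: t).length - 1 = t.length + 1 by simp]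
      rw [List.range_succ_eq_map, List.all_cons, List.all_map]
      have h1 : ((fun k => !((x :: y :: t)[k]? == (x :: y :: t)[k + 1]?)) ∘ Nat.succ)
          = fun k => !((y :: t)[k]? == (y :: t)[k + 1]?) := by
        funext k
        simp
      rw [h1]
      have h2 : (y :: t).length - 1 = t.length := by simp
      rw [← h2, ih]
      simp [nadj]

theorem rangeAll_eq_nadj (l : List Char) :
    (PySem.List.pyRange 0 ((l.length : Int) - 1) 1).all
      (fun i => !(PySem.List.pyGet? l i == PySem.List.pyGet? l (i + 1))) = nadj l := by
  rw [PySem.List.pyRange_one, List.all_map, ← rangeAllNat_eq_nadj l]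
  have hlen : (((l.length : Int) - 1) - 0).toNat = l.length - 1 := by omega
  rw [hlen]
  congr 1
  funext k
  simp only [Function.comp_apply]
  rw [show ((0 : Int) + (k : Int) + 1) = ((k + 1 : Nat) : Int) by push_cast; ring,
      show ((0 : Int) + (k : Int)) = ((k : Nat) : Int) by ring,
      PySem.List.pyGet?_natCast, PySem.List.pyGet?_natCast]

theorem wave_of : ∀ (t : List Char) (x y : Char), x ≠ y →
    (∀ c ∈ t, c = x ∨ c = y) → nadj (y :: t) = true → waveWalk x y t = true := by
  intro t
  induction t with
  | nil => intro x y _ _ _; rfl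
  | cons c t ih =>
    intro x y hxy hmem hnadj
    simp only [nadj, Bool.and_eq_true] at hnadj
    have hyc : ¬ (y = c) := by simpa using hnadj.1
    have hcx : c = x := by
      rcases hmem c (by simp) with h | h
      · exact h
      · exact absurd h.symm hyc
    subst hcx
    simp only [waveWalk, bne_self_eq_false, Bool.false_eq_true, if_false]
    exact ih y c (Ne.symm hxy)
      (fun d hd => (hmem d (List.mem_cons_of_mem _ hd)).symm) hnadj.2

theorem of_wave : ∀ (t : List Char) (x y : Char), x ≠ y → waveWalk x y t = true →
    (∀ c ∈ t, c = x ∨ c = y) ∧ ∀ z, z ≠ x → nadj (z :: t) = true := by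
  intro t
  induction t with
  | nil => intro x y _ _; exact ⟨by simp, fun z _ => rfl⟩
  | cons c t ih =>
    intro x y hxy hw
    have hcx : c = x := by
      by_contra hne
      simp only [waveWalk] at hw
      rw [if_pos (by simpa using hne)] at hw
      exact absurd hw (by simp)
    subst hcx
    have hw2 : waveWalk y c t = true := by simpa [waveWalk] using hw
    obtain ⟨hm, hz⟩ := ih y c (Ne.symm hxy) hw2
    refine ⟨?_, ?_⟩
    · intro d hd
      rcases List.mem_cons.mp hd with rfl | hd
      · exact Or.inl rfl
      · exact (hm d hd).symm
    · intro z hz'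
      simp only [nadj, Bool.and_eq_true]
      exact ⟨by simpa using hz', hz c hxy⟩

theorem card_two_iff (t : List Char) (a b : Char) (hab : a ≠ b) :
    (PySem.Set.ofList (a :: b :: t)).length = 2 ↔ ∀ c ∈ t, c = a ∨ c = b := by
  constructor
  · intro h2 c hc
    obtain ⟨x, y, hxy⟩ := List.length_eq_two.mp h2
    have ha : a ∈ PySem.Set.ofList (a :: b :: t) := (PySem.Set.mem_ofList _ _).mpr (by simp)
    have hb : b ∈ PySem.Set.ofList (a :: b :: t) := (PySem.Set.mem_ofList _ _).mpr (by simp)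
    have hcm : c ∈ PySem.Set.ofList (a :: b :: t) :=
      (PySem.Set.mem_ofList _ _).mpr (by simp [hc])
    rw [hxy] at ha hb hcm
    simp only [List.mem_cons, List.not_mem_nil, or_false] at ha hb hcm
    rcases ha with rfl | rfl <;> rcases hb with rfl | rfl <;> tauto
  · intro hmem
    have hperm : (PySem.Set.ofList (a :: b :: t)).Perm [a, b] := by
      rw [List.perm_ext_iff_of_nodup (PySem.Set.nodup_ofList _) (by simp [hab])]
      intro c
      rw [PySem.Set.mem_ofList]
      constructor
      · intro hc
        rcases List.mem_cons.mp hc with rfl | hc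
        · simp
        · rcases List.mem_cons.mp hc with rfl | hc
          · simp
          · rcases hmem c hc with rfl | rfl <;> simp
      · intro hc
        rcases List.mem_cons.mp hc with rfl | hc
        · simp
        · simp only [List.mem_cons, List.not_mem_nil, or_false] at hc
          subst hc; simp
    simpa using hperm.length_eq

theorem main_cons (a b : Char) (t : List Char) (hab : a ≠ b) :
    (if ((PySem.Set.ofList (a :: b :: t)).length != 2) = true then false
     else if (a == b) = true then false else nadj (a :: b :: t))
    = (if (a == b) = true then false else waveWalk a b (a :: b :: t)) := by
  have he : (a == b) = false := by simpa using hab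
  simp only [he, Bool.false_eq_true, if_false]
  by_cases hw : waveWalk a b (a :: b :: t) = true
  · have hw2 : waveWalk a b t = true := by simpa [waveWalk] using hw
    obtain ⟨hm, hz⟩ := of_wave t a b hab hw2
    have hcard : (PySem.Set.ofList (a :: b :: t)).length = 2 :=
      (card_two_iff t a b hab).mpr hm
    have hbt : nadj (b :: t) = true := hz b (Ne.symm hab)
    have hn : nadj (a :: b :: t) = true := by
      simp only [nadj, Bool.and_eq_true]
      exact ⟨by simpa using hab, hbt⟩
    simp [hcard, hn, hw]
  · have hwf : waveWalk a b (a :: b :: t) = false := by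
      cases h : waveWalk a b (a :: b :: t)
      · rfl
      · exact absurd h hw
    rw [hwf]
    cases hn : nadj (a :: b :: t)
    · simp
    · by_cases hcard : (PySem.Set.ofList (a :: b :: t)).length = 2
      · exfalso
        apply hw
        have hm := (card_two_iff t a b hab).mp hcard
        have hbt : nadj (b :: t) = true := by
          have := hn
          simp only [nadj, Bool.and_eq_true] at this
          exact this.2
        simpa [waveWalk] using wave_of t a b hab hm hbt
      · simp [hcard]

-- ===== VERDICT (by name: the statement is the Claim_ definition above) =====
theorem is_wave_number_spec : Claim_equal_is_wave_number := by
  intro s _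
  unfold Spec_is_wave_number
  cases hl : s.toList with
  | nil => simp [is_wave_number, is_wave_number_alt, hl, PySem.Set.ofList]
  | cons a l' =>
    cases l' with
    | nil => simp [is_wave_number, is_wave_number_alt, hl]
    | cons b t =>
      have h0 : PySem.List.pyGet? (a :: b :: t) (0 : Int) = some a :=
        PySem.List.pyGet?_zero_cons a (b :: t)
      have h1 : PySem.List.pyGet? (a :: b :: t) (1 : Int) = some b := by
        rw [show (1 : Int) = ((1 : Nat) : Int) from rfl, PySem.List.pyGet?_natCast]
        rfl
      have hc1 : ¬ (((a :: b :: t).length == 1) = true) := by simp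
      have hc2 : ¬ ((a :: b :: t).length < 2) := by
        simp only [List.length_cons]; omega
      simp only [is_wave_number, is_wave_number_alt]
      rw [hl]
      rw [if_neg hc1, if_neg hc1, if_neg hc2]
      simp only [h0, h1]
      by_cases hab : a = b
      · subst hab
        simp
      · rw [rangeAll_eq_nadj (a :: b :: t)]
        exact main_cons a b t hab
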